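-- pv_equiv track=rewrite | github.com/quimibond/qb19 | addons/quimibond_intelligence/services/enrichment_helpers.py | is_automated_sender
-- ===== SOURCE A (Python) =====
-- AUTOMATED_PREFIXES = (
--     'noreply', 'no-reply', 'no-responder', 'donotreply',
--     'notifications', 'notification', 'alerts', 'alert',
--     'calendar-notification', 'mailer-daemon', 'postmaster',
--     'bounce', 'system', 'daemon', 'auto', 'robot',
-- )
--
-- SERVICE_DOMAINS = frozenset({
--     # Dev/infra tools
--     'github.com', 'vercel.com', 'supabase.com', 'n8n.io',
--     'ngrok.com', 'anthropic.com', 'mail.anthropic.com',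
--     'paddle.com', 'stripe.com', 'mongodb.com', 'voyage.mongodb.com',
--     'incident.io', 'status.incident.io', 'transactional.n8n.io',
--     'info.n8n.io',
--     # Google services
--     'accounts.google.com', 'docs.google.com',
--     # Job boards
--     'indeed.com', 'indeedemail.com', 'acciontrabajo.com',
--     'mex.acciontrabajo.com',
--     # Social/newsletters
--     'quora.com', 'ccsend.com', 'shared1.ccsend.com',
--     'constantcontact.com', 'smergers.net',
--     # Banking notifications (not business contacts)
--     'bbva.mx', 'mifel.com.mx',
--     # Logistics tracking (automated)
--     'one-line.com', 'customer.cmacgm-group.com',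
--     # Consumer services
--     'uber.com', 'amazon.com', 'amazon.com.mx', 'eg.expedia.com',
--     'expedia.com',
--     # Government automated
--     'sat.gob.mx', 'buengobierno.gob.mx',
--     # Odoo notifications
--     'mail.odoo.com',
--     # Read.ai, Spaceti, etc.
--     'e.read.ai', 'spaceti.cloud',
-- })
--
-- def is_automated_sender(email: str) -> bool:
--     """Return True if email is from an automated/non-human sender."""
--     if not email:
--         return False
--     email = email.lower().strip()
--     local = email.split('@')[0] if '@' in email else ''
--     domain = email.split('@')[1] if '@' in email else ''
--
--     # Check prefix
--     for prefix in AUTOMATED_PREFIXES: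
--         if local == prefix or local.startswith(prefix + '-') or local.startswith(prefix + '+'):
--             return True
--
--     # Check domain (exact or subdomain)
--     if domain in SERVICE_DOMAINS:
--         return True
--     # Check parent domain (e.g., status.incident.io → incident.io)
--     parts = domain.split('.')
--     for i in range(1, len(parts)):
--         parent = '.'.join(parts[i:])
--         if parent in SERVICE_DOMAINS:
--             return True
--
--     return False
-- ===== SOURCE B (Python) =====
-- AUTOMATED_PREFIXES = (
--     'noreply', 'no-reply', 'no-responder', 'donotreply',
--     'notifications', 'notification', 'alerts', 'alert',
--     'calendar-notification', 'mailer-daemon', 'postmaster',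
--     'bounce', 'system', 'daemon', 'auto', 'robot',
-- )
--
-- SERVICE_DOMAINS = frozenset({
--     'github.com', 'vercel.com', 'supabase.com', 'n8n.io',
--     'ngrok.com', 'anthropic.com', 'mail.anthropic.com',
--     'paddle.com', 'stripe.com', 'mongodb.com', 'voyage.mongodb.com',
--     'incident.io', 'status.incident.io', 'transactional.n8n.io',
--     'info.n8n.io',
--     'accounts.google.com', 'docs.google.com',
--     'indeed.com', 'indeedemail.com', 'acciontrabajo.com',
--     'mex.acciontrabajo.com',
--     'quora.com', 'ccsend.com', 'shared1.ccsend.com',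
--     'constantcontact.com', 'smergers.net',
--     'bbva.mx', 'mifel.com.mx',
--     'one-line.com', 'customer.cmacgm-group.com',
--     'uber.com', 'amazon.com', 'amazon.com.mx', 'eg.expedia.com',
--     'expedia.com',
--     'sat.gob.mx', 'buengobierno.gob.mx',
--     'mail.odoo.com',
--     'e.read.ai', 'spaceti.cloud',
-- })
--
--
-- def is_automated_sender(email: str) -> bool:
--     """Return True if email is from an automated/non-human sender."""
--     if not email:
--         return False
--     email = email.lower().strip()
--     local = email.split('@')[0] if '@' in email else ''
--     domain = email.split('@')[1] if '@' in email else ''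
--     if any(local == p or local.startswith(p + '-') or local.startswith(p + '+')
--            for p in AUTOMATED_PREFIXES):
--         return True
--     # exact match, or a dot-boundary suffix match against each known service domain
--     return any(domain == d or domain.endswith('.' + d) for d in SERVICE_DOMAINS)
-- ===== Notes on version B (the rewrite author's own statement) =====
-- stated objective: idiomatic
-- what changed: The domain check no longer generates every dot-joined parent suffix of the address's domain and hashes each into the set; instead it makes a single scan over SERVICE_DOMAINS testing each entry for an exact match or a dot-boundary suffix match via endswith, and the prefix loop becomes a single any expression.
import Mathlib
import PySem

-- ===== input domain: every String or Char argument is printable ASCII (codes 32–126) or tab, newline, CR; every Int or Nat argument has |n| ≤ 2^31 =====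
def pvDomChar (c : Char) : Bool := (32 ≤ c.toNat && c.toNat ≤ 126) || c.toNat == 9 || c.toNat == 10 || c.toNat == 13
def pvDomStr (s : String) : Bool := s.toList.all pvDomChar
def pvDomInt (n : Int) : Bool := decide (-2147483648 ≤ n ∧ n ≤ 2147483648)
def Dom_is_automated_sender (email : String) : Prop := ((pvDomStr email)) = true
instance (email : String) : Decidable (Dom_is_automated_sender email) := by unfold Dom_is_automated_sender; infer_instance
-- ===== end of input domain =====

-- B replaces A's generate-parent-suffixes-and-hash domain check by a single scan of
-- SERVICE_DOMAINS with an exact-or-dot-boundary-suffix test (objective: more idiomatic).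

-- module constants shared by both implementations (same module in Python)
def pvPrefixes : List String :=
  ["noreply", "no-reply", "no-responder", "donotreply",
   "notifications", "notification", "alerts", "alert",
   "calendar-notification", "mailer-daemon", "postmaster",
   "bounce", "system", "daemon", "auto", "robot"]

def pvServiceDomains : PySem.Set String := PySem.Set.ofList
  ["github.com", "vercel.com", "supabase.com", "n8n.io",
   "ngrok.com", "anthropic.com", "mail.anthropic.com",
   "paddle.com", "stripe.com", "mongodb.com", "voyage.mongodb.com",
   "incident.io", "status.incident.io", "transactional.n8n.io",
   "info.n8n.io",
   "accounts.google.com", "docs.google.com",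
   "indeed.com", "indeedemail.com", "acciontrabajo.com",
   "mex.acciontrabajo.com",
   "quora.com", "ccsend.com", "shared1.ccsend.com",
   "constantcontact.com", "smergers.net",
   "bbva.mx", "mifel.com.mx",
   "one-line.com", "customer.cmacgm-group.com",
   "uber.com", "amazon.com", "amazon.com.mx", "eg.expedia.com",
   "expedia.com",
   "sat.gob.mx", "buengobierno.gob.mx",
   "mail.odoo.com",
   "e.read.ai", "spaceti.cloud"]

-- ===== PORT A =====
-- A's 'for prefix in AUTOMATED_PREFIXES: if …: return True' loop
def pvPrefixLoop (lcl : String) : List String → Bool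
  | [] => false
  | p :: rest =>
    if lcl == p || PySem.Str.startswith lcl (p ++ "-") || PySem.Str.startswith lcl (p ++ "+") then true
    else pvPrefixLoop lcl rest

-- A's 'for i in range(1, len(parts)): if '.'.join(parts[i:]) in SERVICE_DOMAINS: return True' loop
def pvParentLoop (parts : List String) : List Int → Bool
  | [] => false
  | i :: rest =>
    if PySem.Set.contains pvServiceDomains (PySem.Str.join "." (PySem.List.slice parts (some i) none)) then true
    else pvParentLoop parts rest

def is_automated_sender (email : String) : Bool :=
  if email == "" then false
  else
    let e := PySem.Str.strip (PySem.Str.lower email)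
    -- email.split('@')[0] / [1]: split('@') always has ≥ 2 parts when '@' is in email,
    -- so the '.getD' defaults (split? with nonempty sep, indices 0/1) are never used
    let lcl := if PySem.Str.isIn "@" e then (PySem.List.pyGet? ((PySem.Str.split? e "@").getD []) 0).getD "" else ""
    let domain := if PySem.Str.isIn "@" e then (PySem.List.pyGet? ((PySem.Str.split? e "@").getD []) 1).getD "" else ""
    if pvPrefixLoop lcl pvPrefixes then true
    else if PySem.Set.contains pvServiceDomains domain then true
    else
      let parts := (PySem.Str.split? domain ".").getD []
      pvParentLoop parts (PySem.List.pyRange 1 parts.length 1)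

-- ===== PORT B =====
def is_automated_sender_alt (email : String) : Bool :=
  if email == "" then false
  else
    let e := PySem.Str.strip (PySem.Str.lower email)
    -- same split-based extraction as A (see the comment there)
    let lcl := if PySem.Str.isIn "@" e then (PySem.List.pyGet? ((PySem.Str.split? e "@").getD []) 0).getD "" else ""
    let domain := if PySem.Str.isIn "@" e then (PySem.List.pyGet? ((PySem.Str.split? e "@").getD []) 1).getD "" else ""
    if pvPrefixes.any (fun p => lcl == p || PySem.Str.startswith lcl (p ++ "-") || PySem.Str.startswith lcl (p ++ "+")) then true
    -- 'any(... for d in SERVICE_DOMAINS)': an or over the set, so independent of iteration order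
    else pvServiceDomains.any (fun d => domain == d || PySem.Str.endswith domain ("." ++ d))

-- ===== PRECONDITION & SPEC =====
def Spec_is_automated_sender (email : String) (out : Bool) : Prop := out = is_automated_sender_alt email
instance (email : String) (out : Bool) : Decidable (Spec_is_automated_sender email out) := by unfold Spec_is_automated_sender; infer_instance

-- ===== CLAIM (what is proved, stated in full; the proofs are below) =====
def Claim_equal_is_automated_sender : Prop := ∀ (email : String), Dom_is_automated_sender email → Spec_is_automated_sender email (is_automated_sender email)

-- ===== LEMMAS AND PROOFS =====

theorem pv_if_true_or (c b : Bool) : (if c = true then true else b) = (c || b) := by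
  cases c <;> simp

-- simple structural recursion equal to PySem.Chars.splitOn cs ['.']
def pvSplitC : List Char → List (List Char)
  | [] => [[]]
  | a :: t => if a = '.' then [] :: pvSplitC t else (pvSplitC t).modifyHead (a :: ·)

theorem pvSplitC_ne_nil (cs : List Char) : pvSplitC cs ≠ [] := by
  cases cs with
  | nil => simp [pvSplitC]
  | cons a t =>
    simp only [pvSplitC]
    split_ifs with h
    · simp
    · cases hp : pvSplitC t with
      | nil => exact absurd hp (pvSplitC_ne_nil t)
      | cons x xs => simp

theorem pvSplitOn_go_eq (fuel : Nat) (l cur : List Char) (acc : List (List Char))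
    (h : l.length ≤ fuel) :
    PySem.Chars.splitOn.go ['.'] fuel l cur acc
      = acc.reverse ++ (pvSplitC l).modifyHead (cur.reverse ++ ·) := by
  induction fuel generalizing l cur acc with
  | zero =>
    have hl : l = [] := by cases l <;> simp_all
    subst hl
    simp [PySem.Chars.splitOn.go, pvSplitC]
  | succ f ih =>
    cases l with
    | nil => simp [PySem.Chars.splitOn.go, pvSplitC]
    | cons c rest =>
      rw [PySem.Chars.splitOn.go]
      by_cases hc : c = '.'
      · subst hc
        have hpre : List.isPrefixOf ['.'] ('.' :: rest) = true := by
          simp [List.isPrefixOf]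
        simp only [hpre, if_pos, List.length_cons, List.drop_succ_cons, List.length_nil, List.drop_zero]
        rw [ih rest [] (cur.reverse :: acc) (by simpa using h)]
        cases hq : pvSplitC rest with
        | nil => exact absurd hq (pvSplitC_ne_nil rest)
        | cons x xs => simp [pvSplitC, hq]
      · have hpre : List.isPrefixOf ['.'] (c :: rest) = false := by
          simp [List.isPrefixOf]
          exact fun hcc => absurd hcc.symm hc
        simp only [hpre, Bool.false_eq_true, if_false]
        rw [ih rest (c :: cur) acc (by simpa using h)]
        cases hq : pvSplitC rest with
        | nil => exact absurd hq (pvSplitC_ne_nil rest)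
        | cons x xs => simp [pvSplitC, hq, hc]

theorem splitOn_dot (cs : List Char) : PySem.Chars.splitOn cs ['.'] = pvSplitC cs := by
  rw [PySem.Chars.splitOn, pvSplitOn_go_eq _ _ _ _ (Nat.le_succ _)]
  cases hq : pvSplitC cs with
  | nil => exact absurd hq (pvSplitC_ne_nil cs)
  | cons x xs => simp

theorem join_pvSplitC (cs : List Char) : PySem.Chars.join ['.'] (pvSplitC cs) = cs := by
  induction cs with
  | nil => simp [pvSplitC, PySem.Chars.join_singleton]
  | cons a t ih =>
    by_cases ha : a = '.'
    · subst ha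
      simp only [pvSplitC, if_pos]
      cases hq : pvSplitC t with
      | nil => exact absurd hq (pvSplitC_ne_nil t)
      | cons x xs =>
        rw [PySem.Chars.join_cons_cons, ← hq, ih]
        simp
    · simp only [pvSplitC, ha, if_false]
      cases hq : pvSplitC t with
      | nil => exact absurd hq (pvSplitC_ne_nil t)
      | cons x xs =>
        rw [hq] at ih
        cases xs with
        | nil =>
          simpa [PySem.Chars.join_singleton] using congrArg (a :: ·) ih
        | cons y ys =>
          rw [List.modifyHead_cons, PySem.Chars.join_cons_cons]
          rw [PySem.Chars.join_cons_cons] at ih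
          simpa using congrArg (a :: ·) ih

theorem drop_modifyHead_of_pos {α : Type} (f : α → α) (l : List α) (n : Nat) (h : 1 ≤ n) :
    (l.modifyHead f).drop n = l.drop n := by
  cases l with
  | nil => rfl
  | cons x xs =>
    obtain ⟨m, rfl⟩ : ∃ m, n = m + 1 := ⟨n - 1, by omega⟩
    simp [List.modifyHead_cons]

-- crux: parent-domain joins are exactly the after-a-dot suffixes
theorem pvSplit_drop_iff (cs t : List Char) :
    (∃ n : Nat, 1 ≤ n ∧ n < (pvSplitC cs).length ∧
        PySem.Chars.join ['.'] ((pvSplitC cs).drop n) = t)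
      ↔ ('.' :: t) <:+ cs := by
  induction cs generalizing t with
  | nil =>
    constructor
    · rintro ⟨n, h1, h2, -⟩
      simp [pvSplitC] at h2
      omega
    · intro h
      have := h.length_le
      simp at this
  | cons a u ih =>
    rw [List.suffix_cons_iff]
    by_cases ha : a = '.'
    · subst ha
      simp only [pvSplitC, if_pos, List.length_cons]
      constructor
      · rintro ⟨n, h1, h2, h3⟩
        rcases Nat.lt_or_ge n 2 with hn | hn
        · have hn1 : n = 1 := by omega
          subst hn1
          rw [List.drop_succ_cons, List.drop_zero, join_pvSplitC] at h3
          exact Or.inl (by rw [← h3])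
        · refine Or.inr ((ih _).mp ⟨n - 1, by omega, by omega, ?_⟩)
          obtain ⟨m, rfl⟩ : ∃ m, n = m + 1 := ⟨n - 1, by omega⟩
          simpa using h3
      · rintro (heq | hsuf)
        · obtain rfl : t = u := by injection heq
          refine ⟨1, le_refl _, ?_, ?_⟩
          · have := List.length_pos_of_ne_nil (pvSplitC_ne_nil t)
            omega
          · simp [join_pvSplitC]
        · obtain ⟨m, h1, h2, h3⟩ := (ih _).mpr hsuf
          exact ⟨m + 1, by omega, by omega, by simpa using h3⟩
    · have hne : ¬('.' :: t = a :: u) := fun hh => ha (by injection hh with h1 _; exact h1.symm)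
      simp only [pvSplitC, ha, if_false]
      constructor
      · rintro ⟨n, h1, h2, h3⟩
        refine Or.inr ((ih _).mp ⟨n, h1, by simpa using h2, ?_⟩)
        rw [← drop_modifyHead_of_pos (a :: ·) _ _ h1]
        exact h3
      · rintro (hh | hsuf)
        · exact absurd hh hne
        · obtain ⟨n, h1, h2, h3⟩ := (ih _).mpr hsuf
          refine ⟨n, h1, by simpa using h2, ?_⟩
          rw [drop_modifyHead_of_pos (a :: ·) _ _ h1]
          exact h3

-- A's Int-indexed parent-join test, for one candidate d, IS B's dot-boundary suffix test
theorem parent_iff (domain d : String) :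
    (∃ i : Int, (1 ≤ i ∧ i < (((PySem.Str.split? domain ".").getD []).length : Int)) ∧
        PySem.Str.join "." (PySem.List.slice ((PySem.Str.split? domain ".").getD []) (some i) none) = d)
      ↔ PySem.Str.endswith domain ("." ++ d) = true := by
  have hsplit : (PySem.Str.split? domain ".").getD [] = (pvSplitC domain.toList).map String.ofList := by
    rw [PySem.Str.split?]
    simp [PySem.Chars.split?, splitOn_dot]
  rw [hsplit, PySem.Str.endswith_eq]
  have htl : ("." ++ d).toList = '.' :: d.toList := by
    rw [String.toList_append]; rfl
  rw [htl, PySem.Chars.endswith_iff, ← pvSplit_drop_iff domain.toList d.toList]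
  constructor
  · rintro ⟨i, ⟨h1, h2⟩, h3⟩
    rw [List.length_map] at h2
    refine ⟨i.toNat, by omega, by omega, ?_⟩
    rw [PySem.List.slice_from _ (by omega), ← List.map_drop] at h3
    have := congrArg String.toList h3
    rw [PySem.Str.toList_join] at this
    simpa [List.map_map, Function.comp_def, String.toList_ofList] using this
  · rintro ⟨n, h1, h2, h3⟩
    refine ⟨(n : Int), ⟨by omega, by rw [List.length_map]; omega⟩, ?_⟩
    rw [PySem.List.slice_from _ (by omega), ← List.map_drop]
    apply String.toList_inj.mp
    rw [PySem.Str.toList_join]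
    simpa [List.map_map, Function.comp_def, String.toList_ofList] using h3


theorem pvPrefixLoop_eq_any (lcl : String) (L : List String) :
    pvPrefixLoop lcl L
      = L.any (fun p => lcl == p || PySem.Str.startswith lcl (p ++ "-") || PySem.Str.startswith lcl (p ++ "+")) := by
  induction L with
  | nil => rfl
  | cons p rest ih => simp only [pvPrefixLoop, pv_if_true_or, List.any_cons, ← ih]

theorem pvParentLoop_eq_any (parts : List String) (L : List Int) :
    pvParentLoop parts L
      = L.any (fun i => PySem.Set.contains pvServiceDomains (PySem.Str.join "." (PySem.List.slice parts (some i) none))) := by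
  induction L with
  | nil => rfl
  | cons i rest ih => simp only [pvParentLoop, pv_if_true_or, List.any_cons, ← ih]

-- the domain checks of A and B agree on every string
theorem domain_check_eq (domain : String) :
    (if PySem.Set.contains pvServiceDomains domain then true
     else
       pvParentLoop ((PySem.Str.split? domain ".").getD [])
         (PySem.List.pyRange 1 ((PySem.Str.split? domain ".").getD []).length 1))
      = pvServiceDomains.any (fun d => domain == d || PySem.Str.endswith domain ("." ++ d)) := by
  rw [pv_if_true_or, pvParentLoop_eq_any, Bool.eq_iff_iff]
  simp only [Bool.or_eq_true, List.any_eq_true, PySem.Set.contains_iff, beq_iff_eq,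
    PySem.List.mem_pyRange_one]
  constructor
  · rintro (hmem | ⟨i, ⟨h1, h2⟩, hin⟩)
    · exact ⟨domain, hmem, Or.inl rfl⟩
    · refine ⟨_, hin, Or.inr ?_⟩
      exact (parent_iff domain _).mp ⟨i, ⟨h1, by exact_mod_cast h2⟩, rfl⟩
  · rintro ⟨d, hd, (rfl | hend)⟩
    · exact Or.inl hd
    · obtain ⟨i, ⟨h1, h2⟩, hj⟩ := (parent_iff domain d).mpr hend
      exact Or.inr ⟨i, ⟨h1, by exact_mod_cast h2⟩, by rw [hj]; exact hd⟩

-- ===== VERDICT (by name: the statement is the Claim_ definition above) =====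
theorem is_automated_sender_spec : Claim_equal_is_automated_sender := by
  intro email _
  unfold Spec_is_automated_sender
  simp only [is_automated_sender, is_automated_sender_alt]
  by_cases h0 : email == ""
  · simp only [h0, if_pos]
  · simp only [h0, if_neg, Bool.false_eq_true, not_false_eq_true]
    rw [pvPrefixLoop_eq_any]
    by_cases hp :
        pvPrefixes.any (fun p =>
          (if PySem.Str.isIn "@" (PySem.Str.strip (PySem.Str.lower email)) = true then
              (PySem.List.pyGet? ((PySem.Str.split? (PySem.Str.strip (PySem.Str.lower email)) "@").getD []) 0).getD ""
            else "") == p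
          || PySem.Str.startswith
              (if PySem.Str.isIn "@" (PySem.Str.strip (PySem.Str.lower email)) = true then
                (PySem.List.pyGet? ((PySem.Str.split? (PySem.Str.strip (PySem.Str.lower email)) "@").getD []) 0).getD ""
              else "") (p ++ "-")
          || PySem.Str.startswith
              (if PySem.Str.isIn "@" (PySem.Str.strip (PySem.Str.lower email)) = true then
                (PySem.List.pyGet? ((PySem.Str.split? (PySem.Str.strip (PySem.Str.lower email)) "@").getD []) 0).getD ""
              else "") (p ++ "+"))
    · simp only [hp, if_pos]
    · simp only [hp, if_neg, Bool.false_eq_true, not_false_eq_true]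
      exact domain_check_eq _
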